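-- pv_equiv track=rewrite | github.com/Refrain-wbh/BILSTM_CRF | data_process.py | get_right_count
-- ===== SOURCE A (Python) =====
-- def get_right_count(true_label,pred_label,id2tag):
--     true_label = [id2tag[i] for i in true_label]
--     pred_label = [id2tag[i] for i in pred_label]
--     assert len(true_label) == len(pred_label)
--     true_len = 0
--     pred_len = 0
--     right_count = 0
--     for i in range(len(true_label)):
--         tl = true_label[i]
--         pl = pred_label[i]
--         if tl == 'S':
--             true_len = 1
--         else :
--             true_len += 1
--
--         if tl == pl:
--             pred_len += 1
--
--         if tl == 'S' or tl == 'E':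
--             if pred_len == true_len :
--                 right_count += 1
--             true_len = 0
--             pred_len = 0
--     return right_count
-- ===== SOURCE B (Python) =====
-- def get_right_count(true_label, pred_label, id2tag):
--     t = [id2tag[i] for i in true_label]
--     p = [id2tag[i] for i in pred_label]
--     assert len(t) == len(p)
--     # pass 1: cut the pair sequence into segments, each closed by an 'S' or 'E'
--     # true tag; remember the closer tag with each segment (trailing open tail dropped)
--     segments = []
--     cur = []
--     for x in zip(t, p):
--         cur = cur + [x]
--         if x[0] == 'S' or x[0] == 'E':
--             segments.append((cur, x[0]))
--             cur = []
--     # pass 2: score each segment independently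
--     right = 0
--     for seg, closer in segments:
--         target = 1 if closer == 'S' else len(seg)
--         matches = 0
--         for tl, pl in seg:
--             if tl == pl:
--                 matches += 1
--         if matches == target:
--             right += 1
--     return right
-- ===== Notes on version B (the rewrite author's own statement) =====
-- stated objective: alternative
-- what changed: A streams once over the labels with running true_len/pred_len counters reset at each closer; B first cuts the tag-pair sequence into explicit segments (each closed by an 'S'/'E' true tag, keeping the closer), then scores each segment separately by comparing its match count with its target.
import Mathlib
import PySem

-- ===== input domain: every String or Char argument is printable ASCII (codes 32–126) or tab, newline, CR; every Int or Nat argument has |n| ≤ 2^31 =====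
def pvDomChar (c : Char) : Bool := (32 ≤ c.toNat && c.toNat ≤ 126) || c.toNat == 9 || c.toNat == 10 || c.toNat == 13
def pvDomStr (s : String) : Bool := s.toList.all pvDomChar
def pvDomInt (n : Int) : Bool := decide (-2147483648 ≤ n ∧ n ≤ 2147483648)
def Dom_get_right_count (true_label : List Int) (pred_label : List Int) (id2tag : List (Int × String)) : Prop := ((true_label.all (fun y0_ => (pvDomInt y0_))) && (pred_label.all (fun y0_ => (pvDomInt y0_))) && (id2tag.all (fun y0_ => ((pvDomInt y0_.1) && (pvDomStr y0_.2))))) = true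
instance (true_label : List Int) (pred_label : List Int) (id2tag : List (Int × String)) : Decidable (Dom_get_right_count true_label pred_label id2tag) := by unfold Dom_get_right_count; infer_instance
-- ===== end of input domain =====

-- B replaces A's single streaming loop with counters by a two-pass segment decomposition
-- (cut at 'S'/'E' true tags, then score each segment); same cost, proved equal on Pre_.

-- ===== PORT A =====
-- literal port of A; dict lookups id2tag[i] are total here via getD "" — inputs where
-- Python would raise KeyError (missing id) or AssertionError (unequal lengths) are excluded by Pre_
def get_right_count (true_label : List Int) (pred_label : List Int) (id2tag : List (Int × String)) : Int :=
  let t := true_label.map (fun i => (PySem.Dict.mk id2tag).getD i "")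
  let p := pred_label.map (fun i => (PySem.Dict.mk id2tag).getD i "")
  let st := (PySem.List.pyRange 0 (t.length : Int) 1).foldl (fun (st : Int × Int × Int) i =>
      let tl := PySem.List.pyGetD t i ""
      let pl := PySem.List.pyGetD p i ""
      let true_len : Int := if tl = "S" then 1 else st.1 + 1
      let pred_len : Int := if tl = pl then st.2.1 + 1 else st.2.1
      if tl = "S" ∨ tl = "E" then
        (0, 0, if pred_len = true_len then st.2.2 + 1 else st.2.2)
      else (true_len, pred_len, st.2.2)) (0, 0, 0)
  st.2.2

-- ===== PORT B =====
def get_right_count_alt (true_label : List Int) (pred_label : List Int) (id2tag : List (Int × String)) : Int :=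
  let t := true_label.map (fun i => (PySem.Dict.mk id2tag).getD i "")
  let p := pred_label.map (fun i => (PySem.Dict.mk id2tag).getD i "")
  let acc := (t.zip p).foldl
      (fun (acc : List (List (String × String) × String) × List (String × String)) x =>
        let cur := acc.2 ++ [x]
        if x.1 = "S" ∨ x.1 = "E" then (acc.1 ++ [(cur, x.1)], [])
        else (acc.1, cur)) ([], [])
  acc.1.foldl (fun rc seg =>
      let target : Int := if seg.2 = "S" then 1 else (seg.1.length : Int)
      let matched : Int := seg.1.foldl (fun m y => if y.1 = y.2 then m + 1 else m) 0
      if matched = target then rc + 1 else rc) 0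

-- ===== PRECONDITION & SPEC =====
-- Pre_ excludes exactly the inputs where Python A raises: a KeyError (some label id not a key
-- of id2tag) or the AssertionError (label lists of different lengths).
def Pre_get_right_count (true_label : List Int) (pred_label : List Int) (id2tag : List (Int × String)) : Prop :=
  true_label.length = pred_label.length ∧
  ∀ i ∈ true_label ++ pred_label, ((PySem.Dict.mk id2tag).get? i).isSome
instance (true_label : List Int) (pred_label : List Int) (id2tag : List (Int × String)) : Decidable (Pre_get_right_count true_label pred_label id2tag) := by unfold Pre_get_right_count; infer_instance

def pvWitness_get_right_count : List Int × List Int × (List (Int × String)) :=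
  ([0, 1, 2], [0, 2, 2], [(0, "B"), (1, "M"), (2, "E")])

def Spec_get_right_count (true_label : List Int) (pred_label : List Int) (id2tag : List (Int × String)) (out : Int) : Prop := out = get_right_count_alt true_label pred_label id2tag
instance (true_label : List Int) (pred_label : List Int) (id2tag : List (Int × String)) (out : Int) : Decidable (Spec_get_right_count true_label pred_label id2tag out) := by unfold Spec_get_right_count; infer_instance

-- ===== CLAIM (what is proved, stated in full; the proofs are below) =====
def Claim_equal_get_right_count : Prop := ∀ (true_label : List Int) (pred_label : List Int) (id2tag : List (Int × String)), Dom_get_right_count true_label pred_label id2tag → Pre_get_right_count true_label pred_label id2tag → Spec_get_right_count true_label pred_label id2tag (get_right_count true_label pred_label id2tag)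

-- ===== LEMMAS AND PROOFS =====

-- A's loop body / B's two fold bodies, named for the proofs
def pvStepA (st : Int × Int × Int) (x : String × String) : Int × Int × Int :=
  let true_len : Int := if x.1 = "S" then 1 else st.1 + 1
  let pred_len : Int := if x.1 = x.2 then st.2.1 + 1 else st.2.1
  if x.1 = "S" ∨ x.1 = "E" then (0, 0, if pred_len = true_len then st.2.2 + 1 else st.2.2)
  else (true_len, pred_len, st.2.2)

def pvStepSeg (acc : List (List (String × String) × String) × List (String × String))
    (x : String × String) : List (List (String × String) × String) × List (String × String) :=
  let cur := acc.2 ++ [x]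
  if x.1 = "S" ∨ x.1 = "E" then (acc.1 ++ [(cur, x.1)], []) else (acc.1, cur)

def pvScoreStep (rc : Int) (seg : List (String × String) × String) : Int :=
  let target : Int := if seg.2 = "S" then 1 else (seg.1.length : Int)
  let matched : Int := seg.1.foldl (fun m y => if y.1 = y.2 then m + 1 else m) 0
  if matched = target then rc + 1 else rc

def pvMc (l : List (String × String)) : Int :=
  l.foldl (fun m y => if y.1 = y.2 then m + 1 else m) 0

lemma pvMc_append_singleton (l : List (String × String)) (x : String × String) :
    pvMc (l ++ [x]) = if x.1 = x.2 then pvMc l + 1 else pvMc l := by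
  simp [pvMc]

-- the segment accumulator only ever appends to its first component
lemma pvSegs_acc (l : List (String × String)) (s0 : List (List (String × String) × String))
    (cur : List (String × String)) :
    l.foldl pvStepSeg (s0, cur)
      = (s0 ++ (l.foldl pvStepSeg ([], cur)).1, (l.foldl pvStepSeg ([], cur)).2) := by
  induction l generalizing s0 cur with
  | nil => simp
  | cons x l ih =>
    simp only [List.foldl_cons]
    by_cases h : x.1 = "S" ∨ x.1 = "E"
    · rw [show pvStepSeg (s0, cur) x = (s0 ++ [(cur ++ [x], x.1)], []) by simp [pvStepSeg, h],
        show pvStepSeg (([] : List (List (String × String) × String)), cur) x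
            = ([(cur ++ [x], x.1)], []) by simp [pvStepSeg, h]]
      rw [ih (s0 ++ [(cur ++ [x], x.1)]) [], ih [(cur ++ [x], x.1)] []]
      simp
    · rw [show pvStepSeg (s0, cur) x = (s0, cur ++ [x]) by simp [pvStepSeg, h],
        show pvStepSeg (([] : List (List (String × String) × String)), cur) x
            = ([], cur ++ [x]) by simp [pvStepSeg, h]]
      exact ih s0 (cur ++ [x])

-- main invariant: A's running counters are the length / match count of the open segment
lemma pvMain (l : List (String × String)) (cur : List (String × String)) (rc : Int) :
    (l.foldl pvStepA ((cur.length : Int), pvMc cur, rc)).2.2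
      = ((l.foldl pvStepSeg ([], cur)).1).foldl pvScoreStep rc := by
  induction l generalizing cur rc with
  | nil => simp
  | cons x l ih =>
    simp only [List.foldl_cons]
    by_cases h : x.1 = "S" ∨ x.1 = "E"
    · have hseg : pvStepSeg (([] : List (List (String × String) × String)), cur) x
          = ([(cur ++ [x], x.1)], []) := by simp [pvStepSeg, h]
      have hacc := pvSegs_acc l [(cur ++ [x], x.1)] []
      have hsc : pvScoreStep rc (cur ++ [x], x.1)
          = (if (if x.1 = x.2 then pvMc cur + 1 else pvMc cur)
              = (if x.1 = "S" then 1 else (cur.length : Int) + 1) then rc + 1 else rc) := by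
        unfold pvScoreStep
        rw [show (cur ++ [x]).foldl (fun m y => if y.1 = y.2 then m + 1 else m) 0
            = pvMc (cur ++ [x]) from rfl, pvMc_append_singleton]
        by_cases hS : x.1 = "S"
        · simp [hS]
        · have hE : x.1 = "E" := h.resolve_left hS
          have hlen : (((cur ++ [x]).length : Nat) : Int) = (cur.length : Int) + 1 := by
            simp
          simp only [hE, hlen]
      have hA : pvStepA ((cur.length : Int), pvMc cur, rc) x
          = ((([] : List (String × String)).length : Int), pvMc ([] : List (String × String)),
             if (if x.1 = x.2 then pvMc cur + 1 else pvMc cur)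
               = (if x.1 = "S" then 1 else (cur.length : Int) + 1) then rc + 1 else rc) := by
        simp only [pvStepA, h, if_true]
        rfl
      rw [hA, ih, hseg, hacc]
      simp only [List.foldl_append, List.foldl_cons, List.foldl_nil]
      rw [hsc]
    · rw [not_or] at h
      have hA : pvStepA ((cur.length : Int), pvMc cur, rc) x
          = (((cur ++ [x]).length : Int), pvMc (cur ++ [x]), rc) := by
        simp [pvStepA, h.1, h.2, pvMc_append_singleton]
      have hseg : pvStepSeg (([] : List (List (String × String) × String)), cur) x
          = ([], cur ++ [x]) := by simp [pvStepSeg, h.1, h.2]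
      rw [hA, hseg]
      exact ih (cur ++ [x]) rc

-- bridge: A's index loop over range(len) equals a fold over the zipped lists
lemma pvRangeBridge {σ : Type} (g : String → String → σ → σ) :
    ∀ (t p : List String), p.length = t.length → ∀ (st : σ),
    (List.range t.length).foldl (fun st k => g (t.getD k "") (p.getD k "") st) st
      = (t.zip p).foldl (fun st x => g x.1 x.2 st) st := by
  intro t
  induction t with
  | nil => intro p hp st; simp
  | cons a t ih =>
    intro p hp st
    cases p with
    | nil => simp at hp
    | cons b p =>
      simp only [List.length_cons, List.range_succ_eq_map, List.foldl_cons, List.foldl_map,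
        List.zip_cons_cons]
      simpa using ih p (by simpa using hp) (g a b st)

lemma pvRangeBridge' {σ : Type} (g : String → String → σ → σ)
    (t p : List String) (hp : p.length = t.length) (st : σ) :
    (PySem.List.pyRange 0 (t.length : Int) 1).foldl
        (fun st i => g (PySem.List.pyGetD t i "") (PySem.List.pyGetD p i "") st) st
      = (t.zip p).foldl (fun st x => g x.1 x.2 st) st := by
  rw [PySem.List.pyRange_one, List.foldl_map]
  simp only [sub_zero, Int.toNat_natCast, zero_add, PySem.List.pyGetD_natCast]
  exact pvRangeBridge g t p hp st

-- ===== VERDICT (by name: the statement is the Claim_ definition above) =====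
theorem get_right_count_spec : Claim_equal_get_right_count := by
  intro true_label pred_label id2tag _hdom hpre
  unfold Spec_get_right_count get_right_count get_right_count_alt
  have hlen : (pred_label.map (fun i => (PySem.Dict.mk id2tag).getD i "")).length
      = (true_label.map (fun i => (PySem.Dict.mk id2tag).getD i "")).length := by
    simp [hpre.1]
  have hb := pvRangeBridge' (fun tl pl (st : Int × Int × Int) =>
      let true_len : Int := if tl = "S" then 1 else st.1 + 1
      let pred_len : Int := if tl = pl then st.2.1 + 1 else st.2.1
      if tl = "S" ∨ tl = "E" then
        (0, 0, if pred_len = true_len then st.2.2 + 1 else st.2.2)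
      else (true_len, pred_len, st.2.2))
      (true_label.map (fun i => (PySem.Dict.mk id2tag).getD i ""))
      (pred_label.map (fun i => (PySem.Dict.mk id2tag).getD i ""))
      hlen ((0 : Int), (0 : Int), (0 : Int))
  refine Eq.trans (congrArg (fun s : Int × Int × Int => s.2.2) hb) ?_
  exact pvMain _ [] 0
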